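-- pv_equiv track=rewrite | github.com/vadimrogov0610/basis_gf_2 | main.py | int_to_linear
-- ===== SOURCE A (Python) =====
-- def int_to_linear(j: int):
--     ans = []
--     count = 0
--     while j:
--         if j & 1:
--             ans.append(f'x{count}')
--         j >>= 1
--         count += 1
--     return ' + '.join(reversed(ans))
-- ===== SOURCE B (Python) =====
-- def int_to_linear(j: int):
--     s = bin(j)[2:]
--     n = len(s)
--     return ' + '.join(f'x{n - 1 - i}' for i, c in enumerate(s) if c == '1')
-- ===== Notes on version B (the rewrite author's own statement) =====
-- stated objective: idiomatic
-- what changed: Replaces the bit-shift while-loop with its growing list and final reversal by a single left-to-right pass over the precomputed binary string bin(j)[2:], emitting terms already in output order.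
import Mathlib
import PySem

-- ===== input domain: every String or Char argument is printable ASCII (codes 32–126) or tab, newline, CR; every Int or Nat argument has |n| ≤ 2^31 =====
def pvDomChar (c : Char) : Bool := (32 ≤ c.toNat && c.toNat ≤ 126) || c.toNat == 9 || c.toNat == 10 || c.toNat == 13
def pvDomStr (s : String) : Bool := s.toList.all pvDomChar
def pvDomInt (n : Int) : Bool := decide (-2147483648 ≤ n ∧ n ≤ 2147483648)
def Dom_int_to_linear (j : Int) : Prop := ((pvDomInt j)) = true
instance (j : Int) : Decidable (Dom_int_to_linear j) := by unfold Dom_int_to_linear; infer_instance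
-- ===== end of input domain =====

-- B replaces A's bit-shift while-loop and final reversal with one left-to-right pass
-- over the precomputed binary digit string (idiomatic; same cost).


-- ===== PORT A =====
-- the while-loop: state (j, count, ans); stops when j = 0 (for j < 0 Python loops forever,
-- excluded by Pre_; the port just stops there)
def goA (j : Int) (count : Int) (ans : List String) : List String :=
  if h : 0 < j then
    goA (PySem.Int.floordiv j 2) (count + 1)
      (if PySem.Int.mod j 2 == 1 then ans ++ ["x" ++ PySem.Int.toStr count] else ans)
  else ans
termination_by j.toNat
decreasing_by
  have := PySem.Int.floordiv_eq_ediv_of_pos (a := j) (b := 2) (by omega)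
  rw [this]; omega

def int_to_linear (j : Int) : String :=
  PySem.Str.join " + " (goA j 0 []).reverse

-- ===== PORT B =====
-- binary digits of j (MSB first), i.e. bin(j)[2:] for j > 0
def binDigits (j : Int) : List Char :=
  if h : 0 < j then
    binDigits (PySem.Int.floordiv j 2) ++ [if PySem.Int.mod j 2 == 1 then '1' else '0']
  else []
termination_by j.toNat
decreasing_by
  have := PySem.Int.floordiv_eq_ediv_of_pos (a := j) (b := 2) (by omega)
  rw [this]; omega

def int_to_linear_alt (j : Int) : String :=
  let s : List Char := if j == 0 then ['0'] else binDigits j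
  let n : Int := s.length
  PySem.Str.join " + "
    ((PySem.List.enumerate s).filterMap
      (fun p => if p.2 = '1' then some ("x" ++ PySem.Int.toStr (n - 1 - p.1)) else none))

-- ===== PRECONDITION & SPEC =====
-- Pre_ excludes j < 0: there A's `while j` never terminates (j >>= 1 stalls at -1).
def Pre_int_to_linear (j : Int) : Prop := 0 ≤ j
instance (j : Int) : Decidable (Pre_int_to_linear j) := by unfold Pre_int_to_linear; infer_instance
def pvWitness_int_to_linear : Int := (6)

def Spec_int_to_linear (j : Int) (out : String) : Prop := out = int_to_linear_alt j
instance (j : Int) (out : String) : Decidable (Spec_int_to_linear j out) := by unfold Spec_int_to_linear; infer_instance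

-- ===== CLAIM (what is proved, stated in full; the proofs are below) =====
def Claim_equal_int_to_linear : Prop := ∀ (j : Int), Dom_int_to_linear j → Pre_int_to_linear j → Spec_int_to_linear j (int_to_linear j)

-- ===== LEMMAS AND PROOFS =====

-- common canonical form: exponents of the set bits of j, ascending, offset by c
def bitExps (j : Int) (c : Int) : List Int :=
  if h : 0 < j then
    (if PySem.Int.mod j 2 == 1 then [c] else []) ++ bitExps (PySem.Int.floordiv j 2) (c + 1)
  else []
termination_by j.toNat
decreasing_by
  have := PySem.Int.floordiv_eq_ediv_of_pos (a := j) (b := 2) (by omega)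
  rw [this]; omega

def term (e : Int) : String := "x" ++ PySem.Int.toStr e

-- A's loop computes exactly the terms of bitExps, appended to the accumulator
lemma goA_eq (j : Int) : ∀ c ans, goA j c ans = ans ++ (bitExps j c).map term := by
  induction j using binDigits.induct with
  | case1 j h ih =>
    intro c ans
    rw [goA, bitExps]
    simp only [dif_pos h]
    rw [ih]
    split_ifs with hb <;> simp [hb, term]
  | case2 j h =>
    intro c ans
    rw [goA, bitExps]
    simp [h]

-- B's pass over the binary string computes the reversed terms of bitExps
lemma hterms_eq (j : Int) : ∀ (base : Int),
    ((PySem.List.enumerate (binDigits j) 0).filterMap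
      (fun p => if p.2 = '1' then some (term (base + ((binDigits j).length : Int) - 1 - p.1)) else none))
      = ((bitExps j base).reverse).map term := by
  induction j using binDigits.induct with
  | case1 j h ih =>
    intro base
    rw [binDigits, bitExps]
    simp only [dif_pos h]
    rw [PySem.List.enumerate_append, List.filterMap_append]
    have harg : ∀ x : Int, base + (((binDigits (PySem.Int.floordiv j 2)).length : Int) + 1) - 1 - x
        = (base + 1) + ((binDigits (PySem.Int.floordiv j 2)).length : Int) - 1 - x := by
      intro x; ring
    simp only [List.length_append, List.length_cons, List.length_nil, Nat.cast_add,
      Nat.cast_one, zero_add, harg]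
    rw [ih (base + 1)]
    split_ifs with hb <;>
      simp [PySem.List.enumerate, term] <;> ring_nf
  | case2 j h =>
    intro base
    rw [binDigits, bitExps]
    simp [h]

lemma main_eq (j : Int) (hj : 0 ≤ j) : int_to_linear j = int_to_linear_alt j := by
  rcases eq_or_lt_of_le hj with h0 | hpos
  · subst h0
    have hA : goA 0 0 [] = [] := by rw [goA]; simp
    have hB : (PySem.List.enumerate (if (0:Int) == 0 then ['0'] else binDigits 0) 0).filterMap
        (fun p => if p.2 = '1' then some ("x" ++ PySem.Int.toStr ((((if (0:Int) == 0 then ['0'] else binDigits 0).length : Int)) - 1 - p.1)) else none) = [] := by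
      simp [PySem.List.enumerate_cons]
    unfold int_to_linear int_to_linear_alt
    rw [hA]
    simp only [List.reverse_nil]
    rw [hB]
  · unfold int_to_linear int_to_linear_alt
    have hne : (j == 0) = false := by simp; omega
    rw [hne]
    simp only [Bool.false_eq_true, if_false]
    rw [goA_eq j 0 []]
    have harg : ∀ x : Int, ((binDigits j).length : Int) - 1 - x
        = 0 + ((binDigits j).length : Int) - 1 - x := by intro x; ring
    simp only [List.nil_append, List.map_reverse.symm, harg]
    rw [show (fun p : Int × Char => if p.2 = '1' then some ("x" ++ PySem.Int.toStr (0 + ((binDigits j).length : Int) - 1 - p.1)) else none)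
        = (fun p : Int × Char => if p.2 = '1' then some (term (0 + ((binDigits j).length : Int) - 1 - p.1)) else none) from rfl]
    rw [hterms_eq j 0]

-- ===== VERDICT (by name: the statement is the Claim_ definition above) =====
theorem int_to_linear_spec : Claim_equal_int_to_linear := by
  intro j _ hpre
  exact main_eq j hpre
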